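-- pv_equiv track=rewrite | github.com/mansi-singh4/AutomaticJobFinder | tools.py | _pick_best_email
-- ===== SOURCE A (Python) =====
-- from typing import Any, Dict, List, Optional
--
-- def _pick_best_email(emails: List[str], company_name: str = "", domain: str = "") -> Optional[str]:
--     if not emails:
--         return None
--
--     preferred_prefixes = [
--         "careers@", "jobs@", "hr@", "talent@", "recruiting@", "people@",
--         "hiring@", "contact@", "info@", "hello@", "support@"
--     ]
--
--     # 1. First try: Exact prefix + domain or company name match
--     for p in preferred_prefixes:
--         for e in emails:
--             el = e.lower()
--             if el.startswith(p):
--                 if domain and domain in el: return e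
--                 if company_name and len(company_name) > 3 and company_name in el: return e
--
--     # 2. Try any prefix if it matches
--     for p in preferred_prefixes:
--         for e in emails:
--             if e.lower().startswith(p):
--                 return e
--
--     # 3. Domain or company match for anything
--     for e in emails:
--         el = e.lower()
--         if domain and domain in el: return e
--         if company_name and len(company_name) > 3 and company_name in el: return e
--
--     return emails[0]
-- ===== SOURCE B (Python) =====
-- from typing import List, Optional
--
-- _PREFIXES = [
--     "careers@", "jobs@", "hr@", "talent@", "recruiting@", "people@",
--     "hiring@", "contact@", "info@", "hello@", "support@"
-- ]
--
-- def _pick_best_email(emails: List[str], company_name: str = "", domain: str = "") -> Optional[str]: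
--     # Single pass over emails keeping three running selections instead of
--     # nested prefix/email loops: best matching (rank, email), best ranked
--     # (rank, email), and the first domain/company-matching email.
--     if not emails:
--         return None
--
--     def rank(el: str) -> Optional[int]:
--         for i, p in enumerate(_PREFIXES):
--             if el.startswith(p):
--                 return i
--         return None
--
--     def matches(el: str) -> bool:
--         return (bool(domain) and domain in el) or \
--                (bool(company_name) and len(company_name) > 3 and company_name in el)
--
--     best_match = None   # (rank, email), lowest rank wins, earlier email on ties
--     best_rank = None    # (rank, email)
--     first_match = None  # first email whose lowered form matches domain/company
--     for e in emails:
--         el = e.lower()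
--         r = rank(el)
--         m = matches(el)
--         if r is not None:
--             if m and (best_match is None or r < best_match[0]):
--                 best_match = (r, e)
--             if best_rank is None or r < best_rank[0]:
--                 best_rank = (r, e)
--         if m and first_match is None:
--             first_match = e
--
--     if best_match is not None:
--         return best_match[1]
--     if best_rank is not None:
--         return best_rank[1]
--     if first_match is not None:
--         return first_match
--     return emails[0]
-- ===== Notes on version B (the rewrite author's own statement) =====
-- stated objective: faster
-- what changed: Replaces A's four sequences of nested prefix/email loops (up to 22 rescans of the email list, re-lowering and re-matching each email per prefix) by a single pass over the emails that computes each email's preferred-prefix rank once and keeps three running selections: best (rank, email) among domain/company matches, best (rank, email) overall, and the first matching email.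
import Mathlib
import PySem

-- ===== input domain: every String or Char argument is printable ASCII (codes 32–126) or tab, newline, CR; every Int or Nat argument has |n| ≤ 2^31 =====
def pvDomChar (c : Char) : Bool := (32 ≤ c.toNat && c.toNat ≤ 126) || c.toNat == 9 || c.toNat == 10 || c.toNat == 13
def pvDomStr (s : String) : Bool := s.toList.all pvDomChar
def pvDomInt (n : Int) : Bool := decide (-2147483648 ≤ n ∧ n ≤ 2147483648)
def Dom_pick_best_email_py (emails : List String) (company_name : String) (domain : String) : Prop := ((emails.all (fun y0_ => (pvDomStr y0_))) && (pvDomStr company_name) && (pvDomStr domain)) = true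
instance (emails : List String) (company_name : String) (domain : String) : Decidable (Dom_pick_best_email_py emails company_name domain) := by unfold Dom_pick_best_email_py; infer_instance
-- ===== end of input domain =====

-- B replaces A's four sequences of nested prefix/email loops by ONE pass over the emails
-- keeping three running selections (best matching rank, best rank, first domain/company match).

-- ===== PORT A =====
-- the preferred_prefixes list of A (B uses the same module-level list)
def pvPrefixes : List String := ["careers@", "jobs@", "hr@", "talent@", "recruiting@", "people@", "hiring@", "contact@", "info@", "hello@", "support@"]

-- A's inlined domain/company test on the lowered email (the two early-return ifs)
def pvMatchEl (company_name : String) (domain : String) (el : String) : Bool :=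
  (decide (domain ≠ "") && PySem.Str.isIn domain el)
  || (decide (company_name ≠ "") && decide ((3:Int) < PySem.Str.len company_name) && PySem.Str.isIn company_name el)

def pick_best_email_py (emails : List String) (company_name : String) (domain : String) : Option String :=
  if emails.isEmpty then none
  else
    -- 1. prefix + domain/company match (outer loop over prefixes, inner over emails)
    match pvPrefixes.findSome? (fun p => emails.find? (fun e => PySem.Str.startswith (PySem.Str.lower e) p && pvMatchEl company_name domain (PySem.Str.lower e))) with
    | some e => some e
    | none =>
      -- 2. any prefix
      match pvPrefixes.findSome? (fun p => emails.find? (fun e => PySem.Str.startswith (PySem.Str.lower e) p)) with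
      | some e => some e
      | none =>
        -- 3. domain/company match for anything
        match emails.find? (fun e => pvMatchEl company_name domain (PySem.Str.lower e)) with
        | some e => some e
        | none => emails.head?    -- emails[0]; emails ≠ [] here

-- ===== PORT B =====
-- Source B's rank(el): index of the first prefix el starts with (enumerate loop)
def pvRankFrom (i : Int) (ps : List String) (el : String) : Option Int :=
  match ps with
  | [] => none
  | p :: rest => if PySem.Str.startswith el p then some i else pvRankFrom (i+1) rest el

-- 'best is None or r < best[0]: best = (r, e)'
def pvUpd (acc : Option (Int × String)) (ri : Int) (e : String) : Option (Int × String) :=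
  match acc with
  | none => some (ri, e)
  | some (br, _) => if ri < br then some (ri, e) else acc

-- Source B's loop body: state = (best_match, best_rank, first_match)
def pvStepB (company_name : String) (domain : String)
    (st : Option (Int × String) × Option (Int × String) × Option String) (e : String) :
    Option (Int × String) × Option (Int × String) × Option String :=
  let el := PySem.Str.lower e
  let r := pvRankFrom 0 pvPrefixes el
  let m := pvMatchEl company_name domain el
  ( (match r with
     | none => st.1
     | some ri => if m then pvUpd st.1 ri e else st.1),
    (match r with
     | none => st.2.1
     | some ri => pvUpd st.2.1 ri e),
    (if m then (match st.2.2 with | none => some e | some _ => st.2.2) else st.2.2) )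

def pick_best_email_py_alt (emails : List String) (company_name : String) (domain : String) : Option String :=
  if emails.isEmpty then none
  else
    let st := emails.foldl (pvStepB company_name domain) (none, none, none)
    match st.1 with
    | some (_, e) => some e
    | none =>
      match st.2.1 with
      | some (_, e) => some e
      | none =>
        match st.2.2 with
        | some e => some e
        | none => emails.head?

-- ===== PRECONDITION & SPEC =====
def Spec_pick_best_email_py (emails : List String) (company_name : String) (domain : String) (out : Option String) : Prop := out = pick_best_email_py_alt emails company_name domain
instance (emails : List String) (company_name : String) (domain : String) (out : Option String) : Decidable (Spec_pick_best_email_py emails company_name domain out) := by unfold Spec_pick_best_email_py; infer_instance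

-- ===== CLAIM (what is proved, stated in full; the proofs are below) =====
def Claim_equal_pick_best_email_py : Prop := ∀ (emails : List String) (company_name : String) (domain : String), Dom_pick_best_email_py emails company_name domain → Spec_pick_best_email_py emails company_name domain (pick_best_email_py emails company_name domain)

-- ===== LEMMAS AND PROOFS =====

-- generic argmin fold (proof-side view of the first two state components)
def pvBestFold (rank : String → Option Int) (sel : String → Bool) (l : List String) (acc : Option (Int × String)) : Option (Int × String) :=
  l.foldl (fun acc e =>
    match rank e with
    | none => acc
    | some ri => if sel e then pvUpd acc ri e else acc) acc

-- proof-side view of the third component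
def pvFirst (sel : String → Bool) (l : List String) (acc : Option String) : Option String :=
  l.foldl (fun a e => if sel e then (match a with | none => some e | some _ => a) else a) acc

theorem pvStepB_triple (company_name domain : String) (l : List String) :
    ∀ st, l.foldl (pvStepB company_name domain) st
      = (pvBestFold (fun e => pvRankFrom 0 pvPrefixes (PySem.Str.lower e)) (fun e => pvMatchEl company_name domain (PySem.Str.lower e)) l st.1,
         pvBestFold (fun e => pvRankFrom 0 pvPrefixes (PySem.Str.lower e)) (fun _ => true) l st.2.1,
         pvFirst (fun e => pvMatchEl company_name domain (PySem.Str.lower e)) l st.2.2) := by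
  induction l with
  | nil => intro st; simp [pvBestFold, pvFirst]
  | cons e t ih =>
    intro st
    simp only [List.foldl_cons, ih, pvBestFold, pvFirst, pvStepB]
    rfl

theorem pvFirst_some (sel : String → Bool) (l : List String) (a : String) :
    pvFirst sel l (some a) = some a := by
  induction l with
  | nil => rfl
  | cons e t ih =>
    simp only [pvFirst, List.foldl_cons]
    simp only [pvFirst] at ih
    by_cases h : sel e = true
    · rw [if_pos h]; exact ih
    · rw [if_neg h]; exact ih

theorem pvFirst_none (sel : String → Bool) (l : List String) :
    pvFirst sel l none = l.find? sel := by
  induction l with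
  | nil => rfl
  | cons e t ih =>
    simp only [pvFirst, List.foldl_cons]
    rw [List.find?_cons]
    by_cases h : sel e = true
    · rw [if_pos h, h]
      have hs := pvFirst_some sel t e
      simp only [pvFirst] at hs
      exact hs
    · have h' : sel e = false := by simpa using h
      rw [if_neg h, h']
      simp only [pvFirst] at ih
      exact ih

theorem pvRankFrom_ge (ps : List String) : ∀ (i r : Int) (el : String), pvRankFrom i ps el = some r → i ≤ r := by
  induction ps with
  | nil => intro i r el h; simp [pvRankFrom] at h
  | cons p rest ih =>
    intro i r el h
    simp only [pvRankFrom] at h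
    split_ifs at h with hsw
    · injection h with h'; omega
    · have := ih (i+1) r el h; omega

-- a stored minimum no rank can beat is final
theorem pvBestFold_stable (rank : String → Option Int) (sel : String → Bool) (l : List String)
    (b : Int) (a : String) (hb : ∀ e r, rank e = some r → b ≤ r) :
    pvBestFold rank sel l (some (b, a)) = some (b, a) := by
  induction l with
  | nil => rfl
  | cons e t ih =>
    simp only [pvBestFold, List.foldl_cons] at ih ⊢
    cases hre : rank e with
    | none => exact ih
    | some ri =>
      have hle := hb e ri hre
      by_cases hsel : sel e = true
      · show List.foldl _ (if sel e = true then pvUpd (some (b, a)) ri e else some (b, a)) t = some (b, a)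
        rw [if_pos hsel]
        show List.foldl _ (if ri < b then some (ri, e) else some (b, a)) t = some (b, a)
        rw [if_neg (by omega : ¬ ri < b)]
        exact ih
      · show List.foldl _ (if sel e = true then pvUpd (some (b, a)) ri e else some (b, a)) t = some (b, a)
        rw [if_neg hsel]
        exact ih

-- when no rank is ever assigned the fold is the accumulator
theorem pvBestFold_none_rank (rank : String → Option Int) (sel : String → Bool) (l : List String)
    (acc : Option (Int × String)) (h : ∀ e, rank e = none) :
    pvBestFold rank sel l acc = acc := by
  induction l generalizing acc with
  | nil => rfl
  | cons e t ih =>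
    simp only [pvBestFold, List.foldl_cons] at ih ⊢
    rw [h e]
    exact ih acc

-- the accumulator invariant: empty, or a stored rank strictly above i0
def pvAccInv (i0 : Int) (acc : Option (Int × String)) : Prop :=
  acc = none ∨ ∃ b a, acc = some (b, a) ∧ i0 < b

theorem pvUpd_inv (i0 ri : Int) (e : String) (acc : Option (Int × String))
    (hacc : pvAccInv i0 acc) (hge : i0 < ri) : pvAccInv i0 (pvUpd acc ri e) := by
  rcases hacc with h | ⟨b, a, h, hlt⟩
  · subst h; right; exact ⟨ri, e, rfl, hge⟩
  · subst h
    show pvAccInv i0 (if ri < b then some (ri, e) else some (b, a))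
    by_cases h2 : ri < b
    · rw [if_pos h2]; right; exact ⟨ri, e, rfl, hge⟩
    · rw [if_neg h2]; right; exact ⟨b, a, rfl, hlt⟩

-- the cons-prefix unrolling of the argmin fold
theorem pvBestFold_cons_prefix (p : String) (rest : List String) (i0 : Int) (sel : String → Bool) :
    ∀ (l : List String) (acc : Option (Int × String)), pvAccInv i0 acc →
      (pvBestFold (fun e => pvRankFrom i0 (p :: rest) (PySem.Str.lower e)) sel l acc).map Prod.snd
        = match l.find? (fun e => PySem.Str.startswith (PySem.Str.lower e) p && sel e) with
          | some e0 => some e0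
          | none => (pvBestFold (fun e => pvRankFrom (i0+1) rest (PySem.Str.lower e)) sel l acc).map Prod.snd := by
  intro l
  induction l with
  | nil => intro acc _; rfl
  | cons e t ih =>
    intro acc hacc
    have hfold : ∀ (rk : String → Option Int) (a : Option (Int × String)),
        pvBestFold rk sel (e :: t) a
          = pvBestFold rk sel t (match rk e with
              | none => a
              | some ri => if sel e then pvUpd a ri e else a) := fun _ _ => rfl
    rw [hfold, hfold, List.find?_cons]
    by_cases hc : (PySem.Str.startswith (PySem.Str.lower e) p && sel e) = true
    · have hc2 := hc
      simp only [Bool.and_eq_true] at hc2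
      obtain ⟨hsw, hsel⟩ := hc2
      rw [hc]
      have hre : pvRankFrom i0 (p :: rest) (PySem.Str.lower e) = some i0 := by
        simp only [pvRankFrom]; rw [hsw]; simp
      rw [hre]
      show (pvBestFold (fun e => pvRankFrom i0 (p :: rest) (PySem.Str.lower e)) sel t
              (if sel e then pvUpd acc i0 e else acc)).map Prod.snd = some e
      rw [if_pos hsel]
      have hupd : pvUpd acc i0 e = some (i0, e) := by
        rcases hacc with h | ⟨b, a, h, hlt⟩
        · subst h; rfl
        · subst h
          show (if i0 < b then some (i0, e) else some (b, a)) = some (i0, e)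
          rw [if_pos hlt]
      rw [hupd, pvBestFold_stable _ sel t i0 e (fun e' r h => pvRankFrom_ge _ _ _ _ h)]
      rfl
    · have hc' : (PySem.Str.startswith (PySem.Str.lower e) p && sel e) = false := by
        cases hcb : (PySem.Str.startswith (PySem.Str.lower e) p && sel e)
        · rfl
        · exact absurd hcb hc
      rw [hc']
      by_cases hsel : sel e = true
      · have hsw : PySem.Str.startswith (PySem.Str.lower e) p = false := by
          cases hs : PySem.Str.startswith (PySem.Str.lower e) p
          · rfl
          · rw [hs, hsel] at hc'; simp at hc'
        have hre : pvRankFrom i0 (p :: rest) (PySem.Str.lower e)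
            = pvRankFrom (i0+1) rest (PySem.Str.lower e) := by
          simp only [pvRankFrom]; rw [hsw]; simp
        rw [hre]
        cases hrr : pvRankFrom (i0+1) rest (PySem.Str.lower e) with
        | none => exact ih acc hacc
        | some ri =>
          have hge : i0 + 1 ≤ ri := pvRankFrom_ge _ _ _ _ hrr
          show (pvBestFold (fun e => pvRankFrom i0 (p :: rest) (PySem.Str.lower e)) sel t
                  (if sel e then pvUpd acc ri e else acc)).map Prod.snd
            = match t.find? (fun e => PySem.Str.startswith (PySem.Str.lower e) p && sel e) with
              | some e0 => some e0
              | none => (pvBestFold (fun e => pvRankFrom (i0+1) rest (PySem.Str.lower e)) sel t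
                  (if sel e then pvUpd acc ri e else acc)).map Prod.snd
          rw [if_pos hsel]
          exact ih (pvUpd acc ri e) (pvUpd_inv i0 ri e acc hacc (by omega))
      · have hsel' : sel e = false := by
          cases hs : sel e
          · rfl
          · exact absurd hs hsel
        have hred : ∀ (rk : String → Option Int),
            (match rk e with
             | none => acc
             | some ri => if sel e then pvUpd acc ri e else acc) = acc := by
          intro rk
          cases rk e
          · rfl
          · show (if sel e then pvUpd acc _ e else acc) = acc
            rw [hsel']
            simp
        rw [hred (fun e => pvRankFrom i0 (p :: rest) (PySem.Str.lower e)),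
            hred (fun e => pvRankFrom (i0+1) rest (PySem.Str.lower e))]
        exact ih acc hacc

-- MAIN: the outer-prefix / inner-email loops compute the argmin of (rank, position)
theorem pvLoops_eq_best (ps : List String) : ∀ (i0 : Int) (sel : String → Bool) (l : List String),
    ps.findSome? (fun p => l.find? (fun e => PySem.Str.startswith (PySem.Str.lower e) p && sel e))
      = (pvBestFold (fun e => pvRankFrom i0 ps (PySem.Str.lower e)) sel l none).map Prod.snd := by
  induction ps with
  | nil =>
    intro i0 sel l
    rw [pvBestFold_none_rank (fun e => pvRankFrom i0 [] (PySem.Str.lower e)) sel l none (fun e => rfl)]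
    rfl
  | cons p rest ih =>
    intro i0 sel l
    rw [List.findSome?_cons]
    rw [pvBestFold_cons_prefix p rest i0 sel l none (Or.inl rfl)]
    cases hf : l.find? (fun e => PySem.Str.startswith (PySem.Str.lower e) p && sel e) with
    | some e0 => rfl
    | none => exact ih (i0+1) sel l

-- phase 2's lambda has no '&& sel': bridge
theorem pvPhase2_lambda (l : List String) (p : String) :
    l.find? (fun e => PySem.Str.startswith (PySem.Str.lower e) p)
      = l.find? (fun e => PySem.Str.startswith (PySem.Str.lower e) p && true) := by
  simp

-- ===== VERDICT (by name: the statement is the Claim_ definition above) =====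
theorem pick_best_email_py_spec : Claim_equal_pick_best_email_py := by
  intro emails company_name domain _
  unfold Spec_pick_best_email_py pick_best_email_py pick_best_email_py_alt
  by_cases h : emails.isEmpty
  · simp [h]
  · simp only [h, if_neg, Bool.false_eq_true, not_false_iff]
    rw [pvStepB_triple company_name domain emails (none, none, none)]
    have h1 := pvLoops_eq_best pvPrefixes 0 (fun e => pvMatchEl company_name domain (PySem.Str.lower e)) emails
    have h2 := pvLoops_eq_best pvPrefixes 0 (fun _ => true) emails
    have h2' : pvPrefixes.findSome? (fun p => emails.find? (fun e => PySem.Str.startswith (PySem.Str.lower e) p))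
        = (pvBestFold (fun e => pvRankFrom 0 pvPrefixes (PySem.Str.lower e)) (fun _ => true) emails none).map Prod.snd := by
      rw [← h2]
      exact congrArg (fun f => List.findSome? f pvPrefixes) (funext fun p => pvPhase2_lambda emails p)
    rw [h1, h2', ← pvFirst_none]
    cases pvBestFold (fun e => pvRankFrom 0 pvPrefixes (PySem.Str.lower e)) (fun e => pvMatchEl company_name domain (PySem.Str.lower e)) emails none with
    | some v => cases v; rfl
    | none =>
      cases pvBestFold (fun e => pvRankFrom 0 pvPrefixes (PySem.Str.lower e)) (fun _ => true) emails none with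
      | some v => cases v; rfl
      | none => rfl
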